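-- pv_equiv track=rewrite | github.com/Arsen1302/Code-copy-detector | TestData/solutions/problem_1567_2.py | solution_1567_2
-- ===== SOURCE A (Python) =====
-- from typing import List
--
-- def solution_1567_2(tiles: List[List[int]], carpetLen: int) -> int:
--     tiles = sorted(tiles, key = lambda x : x[0])
--     prefix_sum = [0]
--     res = 0
--     for idx, (start, end) in enumerate(tiles):
--         cur_cover = 0
--         prefix_sum.append(prefix_sum[-1] + (end - start + 1))
--         begin = max(0, end - carpetLen + 1)
--         l, r = -1, len(tiles)
--         while l + 1 < r:
--             mid = (l + r) // 2 # >> 1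
--             if tiles[mid][0] <= begin:
--                 l = mid
--             else:
--                 r = mid
--         if tiles[max(0, l)][0] <= begin <= tiles[max(0, l)][1]:
--             cur_cover += tiles[l][1] - begin + 1
--         cur_cover += prefix_sum[idx + 1] - prefix_sum[l + 1]
--         res = max(res, cur_cover)
--     return res
-- ===== SOURCE B (Python) =====
-- from typing import List
--
-- def solution_1567_2(tiles: List[List[int]], carpetLen: int) -> int:
--     srt = sorted(tiles, key=lambda t: t[0])
--     lens = [e - s + 1 for s, e in srt]
--     res = 0
--     for i, (s, e) in enumerate(srt):
--         begin = max(0, e - carpetLen + 1)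
--         cnt = sum(1 for t in srt if t[0] <= begin)
--         cover = sum(lens[:i + 1]) - sum(lens[:cnt])
--         if cnt > 0 and begin <= srt[cnt - 1][1]:
--             cover += srt[cnt - 1][1] - begin + 1
--         res = max(res, cover)
--     return res
-- ===== Notes on version B (the rewrite author's own statement) =====
-- stated objective: simpler
-- what changed: B replaces A's per-tile hand-rolled binary search over the sorted starts and the incrementally appended prefix-sum list by a direct count of tiles whose start is at or left of the carpet start plus prefix-slice sums, keeping only a running maximum.
import Mathlib
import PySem

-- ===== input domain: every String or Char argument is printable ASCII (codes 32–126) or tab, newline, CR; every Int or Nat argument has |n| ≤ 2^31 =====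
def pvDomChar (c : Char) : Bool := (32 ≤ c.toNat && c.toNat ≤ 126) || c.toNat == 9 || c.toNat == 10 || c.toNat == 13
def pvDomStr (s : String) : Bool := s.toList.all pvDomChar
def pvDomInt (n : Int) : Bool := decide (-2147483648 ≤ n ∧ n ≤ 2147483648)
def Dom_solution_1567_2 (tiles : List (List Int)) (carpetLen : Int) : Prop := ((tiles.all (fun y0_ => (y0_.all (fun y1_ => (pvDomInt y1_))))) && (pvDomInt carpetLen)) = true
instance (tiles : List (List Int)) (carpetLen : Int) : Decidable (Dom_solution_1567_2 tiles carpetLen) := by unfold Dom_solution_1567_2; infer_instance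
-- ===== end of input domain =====

-- B replaces A's hand-rolled binary search and incrementally grown prefix-sum list by a direct
-- count of qualifying tiles and prefix-slice sums (objective: simpler; not faster).
-- A does not mutate its argument (sorted() makes a copy), and neither does B.

-- ===== PORT A =====
-- the 'while l + 1 < r' binary-search loop of A, verbatim (indices in range under Pre_)
def pvBsearch (srt : List (List Int)) (begin_ l r : Int) : Int :=
  if l + 1 < r then
    let mid := PySem.Int.floordiv (l + r) 2
    if PySem.List.pyGetD (PySem.List.pyGetD srt mid []) 0 0 ≤ begin_ then
      pvBsearch srt begin_ mid r
    else
      pvBsearch srt begin_ l mid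
  else l
termination_by (r - l).toNat
decreasing_by
  all_goals
    have h1 : l + 1 ≤ PySem.Int.floordiv (l + r) 2 := by
      rw [PySem.Int.le_floordiv_iff_mul_le (by omega)]; omega
    have h2 : PySem.Int.floordiv (l + r) 2 < r := by
      rw [PySem.Int.floordiv_lt_iff_lt_mul (by omega)]; omega
    omega

-- indexing is via pyGetD (defaults never read on inputs admitted by Pre_, where every index is in range)
def solution_1567_2 (tiles : List (List Int)) (carpetLen : Int) : Int :=
  let srt := PySem.List.sorted tiles (fun t => PySem.List.pyGetD t 0 0) false
  ((PySem.List.enumerate srt 0).foldl (fun st p =>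
      let start := PySem.List.pyGetD p.2 0 0
      let end_ := PySem.List.pyGetD p.2 1 0
      let ps := st.1 ++ [PySem.List.pyGetD st.1 (-1) 0 + (end_ - start + 1)]
      let begin_ := max 0 (end_ - carpetLen + 1)
      let l := pvBsearch srt begin_ (-1) (srt.length : Int)
      let tl := PySem.List.pyGetD srt (max 0 l) []
      let cur : Int :=
        (if PySem.List.pyGetD tl 0 0 ≤ begin_ ∧ begin_ ≤ PySem.List.pyGetD tl 1 0 then
           PySem.List.pyGetD (PySem.List.pyGetD srt l []) 1 0 - begin_ + 1 else 0)
      let cur := cur + (PySem.List.pyGetD ps (p.1 + 1) 0 - PySem.List.pyGetD ps (l + 1) 0)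
      (ps, max st.2 cur))
    ([0], 0)).2

-- ===== PORT B =====
def solution_1567_2_alt (tiles : List (List Int)) (carpetLen : Int) : Int :=
  let srt := PySem.List.sorted tiles (fun t => PySem.List.pyGetD t 0 0) false
  let lens := srt.map (fun t => PySem.List.pyGetD t 1 0 - PySem.List.pyGetD t 0 0 + 1)
  (PySem.List.enumerate srt 0).foldl (fun res p =>
      let begin_ := max 0 (PySem.List.pyGetD p.2 1 0 - carpetLen + 1)
      let cnt : Int := (srt.countP (fun u => decide (PySem.List.pyGetD u 0 0 ≤ begin_)) : Int)
      let cover := (PySem.List.slice lens none (some (p.1 + 1))).sum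
                   - (PySem.List.slice lens none (some cnt)).sum
      let cover := if 0 < cnt ∧ begin_ ≤ PySem.List.pyGetD (PySem.List.pyGetD srt (cnt - 1) []) 1 0 then
                     cover + (PySem.List.pyGetD (PySem.List.pyGetD srt (cnt - 1) []) 1 0 - begin_ + 1)
                   else cover
      max res cover) 0

-- ===== PRECONDITION & SPEC =====
-- Pre_ admits exactly the inputs on which A returns: it excludes rows whose length is not 2
-- (unpacking raises ValueError / key lookup IndexError) and the inputs where the binary-search
-- index l exceeds idx, on which A's prefix_sum[l + 1] raises IndexError.
def Pre_solution_1567_2 (tiles : List (List Int)) (carpetLen : Int) : Prop :=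
  (∀ t ∈ tiles, t.length = 2) ∧
  (∀ p ∈ PySem.List.enumerate (PySem.List.sorted tiles (fun t => PySem.List.pyGetD t 0 0) false) 0,
     (((PySem.List.sorted tiles (fun t => PySem.List.pyGetD t 0 0) false).countP
        (fun u => decide (PySem.List.pyGetD u 0 0 ≤ max 0 (PySem.List.pyGetD p.2 1 0 - carpetLen + 1)))
       : Int) ≤ p.1 + 1))
instance (tiles : List (List Int)) (carpetLen : Int) : Decidable (Pre_solution_1567_2 tiles carpetLen) := by
  unfold Pre_solution_1567_2; infer_instance

def pvWitness_solution_1567_2 : List (List Int) × Int := ([[1, 2], [4, 6]], 3)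

def Spec_solution_1567_2 (tiles : List (List Int)) (carpetLen : Int) (out : Int) : Prop := out = solution_1567_2_alt tiles carpetLen
instance (tiles : List (List Int)) (carpetLen : Int) (out : Int) : Decidable (Spec_solution_1567_2 tiles carpetLen out) := by unfold Spec_solution_1567_2; infer_instance

-- ===== CLAIM (what is proved, stated in full; the proofs are below) =====
def Claim_equal_solution_1567_2 : Prop := ∀ (tiles : List (List Int)) (carpetLen : Int), Dom_solution_1567_2 tiles carpetLen → Pre_solution_1567_2 tiles carpetLen → Spec_solution_1567_2 tiles carpetLen (solution_1567_2 tiles carpetLen)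


-- ===== LEMMAS AND PROOFS =====

-- proof-side abbreviations for the shared pieces of both ports
def pvSrt (tiles : List (List Int)) : List (List Int) :=
  PySem.List.sorted tiles (fun t => PySem.List.pyGetD t 0 0) false
def pvLens (tiles : List (List Int)) : List Int :=
  (pvSrt tiles).map (fun t => PySem.List.pyGetD t 1 0 - PySem.List.pyGetD t 0 0 + 1)
def pvS (tiles : List (List Int)) (j : Nat) : Int := ((pvLens tiles).take j).sum
def pvPs (tiles : List (List Int)) (k : Nat) : List Int :=
  (List.range (k + 1)).map (fun j => pvS tiles j)
def pvCnt (tiles : List (List Int)) (b : Int) : Nat :=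
  (pvSrt tiles).countP (fun u => decide (PySem.List.pyGetD u 0 0 ≤ b))
def pvBeg (carpetLen : Int) (t : List Int) : Int := max 0 (PySem.List.pyGetD t 1 0 - carpetLen + 1)

-- the per-index value A's loop takes a running max of
def pvCoverA (tiles : List (List Int)) (carpetLen : Int) (i : Int) (t : List Int) : Int :=
  let srt := pvSrt tiles
  let begin_ := pvBeg carpetLen t
  let l := pvBsearch srt begin_ (-1) (srt.length : Int)
  let tl := PySem.List.pyGetD srt (max 0 l) []
  (if PySem.List.pyGetD tl 0 0 ≤ begin_ ∧ begin_ ≤ PySem.List.pyGetD tl 1 0 then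
     PySem.List.pyGetD (PySem.List.pyGetD srt l []) 1 0 - begin_ + 1 else 0)
  + (pvS tiles (i + 1).toNat - pvS tiles (l + 1).toNat)

-- generic: a downward-closed predicate on a list holds exactly on the first countP positions
theorem pv_countP_prefix {α : Type} (xs : List α) (p : α → Bool)
    (h : ∀ (i j : Nat) (hij : i ≤ j) (hj : j < xs.length),
       p (xs[j]'hj) = true → p (xs[i]'(lt_of_le_of_lt hij hj)) = true) :
    ∀ (i : Nat) (hi : i < xs.length), (p (xs[i]'hi) = true ↔ i < xs.countP p) := by
  induction xs with
  | nil => intro i hi; simp at hi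
  | cons x t ih =>
    intro i hi
    by_cases hx : p x = true
    · rw [List.countP_cons_of_pos (p := p) hx]
      cases i with
      | zero => simpa using hx
      | succ j =>
        have ht : ∀ (i j : Nat) (hij : i ≤ j) (hj : j < t.length),
            p (t[j]'hj) = true → p (t[i]'(lt_of_le_of_lt hij hj)) = true := by
          intro i j hij hj hp
          have := h (i+1) (j+1) (by omega) (by simpa using Nat.succ_lt_succ hj) (by simpa using hp)
          simpa using this
        have hj : j < t.length := by simpa using hi
        have := ih ht j hj
        simpa [Nat.succ_lt_succ_iff] using this
    · have hall : ∀ y ∈ t, ¬ p y = true := by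
        intro y hy hp
        obtain ⟨j, hj, rfl⟩ := List.mem_iff_getElem.mp hy
        exact hx (h 0 (j+1) (by omega) (by simpa using Nat.succ_lt_succ hj) (by simpa using hp))
      have hz : t.countP p = 0 := List.countP_eq_zero.mpr (by intro y hy; simpa using hall y hy)
      rw [List.countP_cons_of_neg (p := p) (by simpa using hx), hz]
      cases i with
      | zero => simpa using hx
      | succ j =>
        have hj : j < t.length := by simpa using hi
        simp only [List.getElem_cons_succ]
        constructor
        · intro hp; exact absurd hp (hall _ (List.getElem_mem hj))
        · omega

-- specialisation to the sorted list and the predicate "start ≤ b"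
theorem pv_cnt_iff (tiles : List (List Int)) (b : Int) :
    ∀ (i : Nat) (hi : i < (pvSrt tiles).length),
      ((decide (PySem.List.pyGetD ((pvSrt tiles)[i]'hi) 0 0 ≤ b)) = true ↔ i < pvCnt tiles b) := by
  unfold pvCnt
  apply pv_countP_prefix ((pvSrt tiles)) (fun u => decide (PySem.List.pyGetD u 0 0 ≤ b))
  intro i j hij hj hp
  simp only [decide_eq_true_eq] at hp ⊢
  exact le_trans (PySem.List.key_sorted_getElem_mono tiles (fun t => PySem.List.pyGetD t 0 0) hij hj) hp

theorem pv_cnt_le_len (tiles : List (List Int)) (b : Int) : pvCnt tiles b ≤ (pvSrt tiles).length :=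
  List.countP_le_length

-- the binary search returns (count of qualifying tiles) - 1
theorem pv_bsearch_eq (tiles : List (List Int)) (b : Int) :
    ∀ (l r : Int), -1 ≤ l → l < (pvCnt tiles b : Int) → (pvCnt tiles b : Int) ≤ r →
      r ≤ ((pvSrt tiles).length : Int) →
      pvBsearch (pvSrt tiles) b l r = (pvCnt tiles b : Int) - 1 := by
  have main : ∀ (m : Nat) (l r : Int), (r - l).toNat ≤ m → -1 ≤ l → l < (pvCnt tiles b : Int) →
      (pvCnt tiles b : Int) ≤ r → r ≤ ((pvSrt tiles).length : Int) →
      pvBsearch (pvSrt tiles) b l r = (pvCnt tiles b : Int) - 1 := by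
    intro m
    induction m with
    | zero => intro l r hm h1 h2 h3 h4; omega
    | succ m ih =>
      intro l r hm h1 h2 h3 h4
      rw [pvBsearch]
      by_cases hlr : l + 1 < r
      · simp only [if_pos hlr]
        have hm1 : l + 1 ≤ PySem.Int.floordiv (l + r) 2 := by
          rw [PySem.Int.le_floordiv_iff_mul_le (by omega)]; omega
        have hm2 : PySem.Int.floordiv (l + r) 2 < r := by
          rw [PySem.Int.floordiv_lt_iff_lt_mul (by omega)]; omega
        have hmr : (PySem.Int.floordiv (l + r) 2).toNat < (pvSrt tiles).length := by omega
        have hget : PySem.List.pyGetD (pvSrt tiles) (PySem.Int.floordiv (l + r) 2) []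
            = (pvSrt tiles)[(PySem.Int.floordiv (l + r) 2).toNat] :=
          PySem.List.pyGetD_eq_getElem _ _ (by omega) (by omega)
        have hiff := pv_cnt_iff tiles b (PySem.Int.floordiv (l + r) 2).toNat hmr
        by_cases hp : PySem.List.pyGetD (PySem.List.pyGetD (pvSrt tiles) (PySem.Int.floordiv (l + r) 2) []) 0 0 ≤ b
        · simp only [if_pos hp]
          rw [hget] at hp
          have hlt : ((PySem.Int.floordiv (l + r) 2).toNat : Int) < (pvCnt tiles b : Int) := by
            exact_mod_cast hiff.mp (by simpa using hp)
          exact ih _ r (by omega) (by omega) (by omega) h3 h4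
        · simp only [if_neg hp]
          rw [hget] at hp
          have hge : (pvCnt tiles b : Int) ≤ ((PySem.Int.floordiv (l + r) 2).toNat : Int) := by
            by_contra hc
            exact hp (by simpa using hiff.mpr (by omega))
          exact ih l _ (by omega) h1 h2 (by omega) (by omega)
      · simp only [if_neg hlr]; omega
  intro l r h1 h2 h3 h4
  exact main (r - l).toNat l r le_rfl h1 h2 h3 h4

-- prefix-sum list shape
theorem pv_ps_succ (tiles : List (List Int)) (k : Nat) :
    pvPs tiles (k + 1) = pvPs tiles k ++ [pvS tiles (k + 1)] := by
  simp [pvPs, List.range_succ]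

theorem pv_ps_get (tiles : List (List Int)) (k : Nat) (j : Int) (h0 : 0 ≤ j) (h1 : j ≤ (k : Int)) :
    PySem.List.pyGetD (pvPs tiles k) j 0 = pvS tiles j.toNat := by
  have hlen : (pvPs tiles k).length = k + 1 := by simp [pvPs]
  rw [PySem.List.pyGetD_eq_getElem _ _ h0 (by omega)]
  simp [pvPs]

theorem pv_S_succ (tiles : List (List Int)) (k : Nat) (hk : k < (pvSrt tiles).length) :
    pvS tiles (k + 1)
      = pvS tiles k + (PySem.List.pyGetD ((pvSrt tiles)[k]'hk) 1 0
                       - PySem.List.pyGetD ((pvSrt tiles)[k]'hk) 0 0 + 1) := by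
  have hk' : k < (pvLens tiles).length := by simpa [pvLens] using hk
  unfold pvS
  rw [List.sum_take_succ _ _ hk']
  simp [pvLens]

theorem pv_ps_last (tiles : List (List Int)) (k : Nat) :
    PySem.List.pyGetD (pvPs tiles k) (-1) 0 = pvS tiles k := by
  cases k with
  | zero =>
    show PySem.List.pyGetD ([] ++ [pvS tiles 0]) (-1) 0 = pvS tiles 0
    exact PySem.List.pyGetD_neg_one_append_singleton _ _ _
  | succ j =>
    rw [pv_ps_succ]
    exact PySem.List.pyGetD_neg_one_append_singleton _ _ _

-- A's stateful loop, started at position k with the matching prefix-sum list, is the stateless max-fold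
theorem pv_A_loop (tiles : List (List Int)) (carpetLen : Int)
    (hPre : ∀ (k : Nat) (hk : k < (pvSrt tiles).length),
       (pvCnt tiles (pvBeg carpetLen ((pvSrt tiles)[k]'hk)) : Int) ≤ (k : Int) + 1) :
    ∀ (m k : Nat) (res : Int), k ≤ (pvSrt tiles).length → m = (pvSrt tiles).length - k →
      (((PySem.List.enumerate (pvSrt tiles) 0).drop k).foldl (fun st p =>
          let start := PySem.List.pyGetD p.2 0 0
          let end_ := PySem.List.pyGetD p.2 1 0
          let ps := st.1 ++ [PySem.List.pyGetD st.1 (-1) 0 + (end_ - start + 1)]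
          let begin_ := max 0 (end_ - carpetLen + 1)
          let l := pvBsearch (pvSrt tiles) begin_ (-1) ((pvSrt tiles).length : Int)
          let tl := PySem.List.pyGetD (pvSrt tiles) (max 0 l) []
          let cur : Int :=
            (if PySem.List.pyGetD tl 0 0 ≤ begin_ ∧ begin_ ≤ PySem.List.pyGetD tl 1 0 then
               PySem.List.pyGetD (PySem.List.pyGetD (pvSrt tiles) l []) 1 0 - begin_ + 1 else 0)
          let cur := cur + (PySem.List.pyGetD ps (p.1 + 1) 0 - PySem.List.pyGetD ps (l + 1) 0)
          (ps, max st.2 cur)) (pvPs tiles k, res)).2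
      = ((PySem.List.enumerate (pvSrt tiles) 0).drop k).foldl
          (fun r p => max r (pvCoverA tiles carpetLen p.1 p.2)) res := by
  intro m
  induction m with
  | zero =>
    intro k res hk hm
    have hnil : (PySem.List.enumerate (pvSrt tiles) 0).drop k = [] :=
      List.drop_eq_nil_of_le (by rw [PySem.List.length_enumerate]; omega)
    simp [hnil]
  | succ m ih =>
    intro k res hk hm
    have hkn : k < (pvSrt tiles).length := by omega
    have hlen : k < (PySem.List.enumerate (pvSrt tiles) 0).length := by
      rw [PySem.List.length_enumerate]; omega
    rw [List.drop_eq_getElem_cons hlen, PySem.List.getElem_enumerate,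
        List.foldl_cons, List.foldl_cons]
    refine Eq.trans ?_ (ih (k + 1)
      (max res (pvCoverA tiles carpetLen ((0 : Int) + (k : Int)) ((pvSrt tiles)[k]'hkn)))
      (by omega) (by omega))
    congr 1
    congr 1
    -- step equality: one loop body application
    have hc := hPre k hkn
    have hl : pvBsearch (pvSrt tiles)
        (max 0 (PySem.List.pyGetD ((pvSrt tiles)[k]'hkn) 1 0 - carpetLen + 1)) (-1)
        (((pvSrt tiles).length : Nat) : Int)
        = ((pvCnt tiles (max 0 (PySem.List.pyGetD ((pvSrt tiles)[k]'hkn) 1 0 - carpetLen + 1)) : Nat) : Int) - 1 := by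
      apply pv_bsearch_eq tiles _ (-1) _ le_rfl (by omega)
      · exact_mod_cast pv_cnt_le_len tiles _
      · exact le_refl _
    simp only [pvBeg] at hc
    simp only [pvCoverA, pvBeg, pv_ps_last, hl]
    rw [← pv_S_succ tiles k hkn, ← pv_ps_succ]
    rw [pv_ps_get tiles (k + 1) (0 + (k : Int) + 1) (by omega) (by push_cast; omega),
        pv_ps_get tiles (k + 1)
          (((pvCnt tiles (max 0 (PySem.List.pyGetD ((pvSrt tiles)[k]'hkn) 1 0 - carpetLen + 1)) : Nat) : Int) - 1 + 1)
          (by omega) (by push_cast; omega)]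

-- per index, A's cover value equals B's (core form, with the carpet start generalized)
theorem pv_cover_core (tiles : List (List Int)) (k : Nat) (hk : k < (pvSrt tiles).length)
    (beg : Int) :
    (if PySem.List.pyGetD (PySem.List.pyGetD (pvSrt tiles) (max 0 (pvBsearch (pvSrt tiles) beg (-1) ((pvSrt tiles).length : Int))) []) 0 0 ≤ beg ∧
        beg ≤ PySem.List.pyGetD (PySem.List.pyGetD (pvSrt tiles) (max 0 (pvBsearch (pvSrt tiles) beg (-1) ((pvSrt tiles).length : Int))) []) 1 0 then
       PySem.List.pyGetD (PySem.List.pyGetD (pvSrt tiles) (pvBsearch (pvSrt tiles) beg (-1) ((pvSrt tiles).length : Int)) []) 1 0 - beg + 1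
     else 0)
    + (pvS tiles ((0 : Int) + (k : Int) + 1).toNat - pvS tiles (pvBsearch (pvSrt tiles) beg (-1) ((pvSrt tiles).length : Int) + 1).toNat)
    = (if 0 < (((pvSrt tiles).countP (fun u => decide (PySem.List.pyGetD u 0 0 ≤ beg)) : Nat) : Int) ∧
         beg ≤ PySem.List.pyGetD (PySem.List.pyGetD (pvSrt tiles) ((((pvSrt tiles).countP (fun u => decide (PySem.List.pyGetD u 0 0 ≤ beg)) : Nat) : Int) - 1) []) 1 0 then
        (PySem.List.slice (pvLens tiles) none (some ((0 : Int) + (k : Int) + 1))).sum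
        - (PySem.List.slice (pvLens tiles) none (some (((pvSrt tiles).countP (fun u => decide (PySem.List.pyGetD u 0 0 ≤ beg)) : Nat) : Int))).sum
        + (PySem.List.pyGetD (PySem.List.pyGetD (pvSrt tiles) ((((pvSrt tiles).countP (fun u => decide (PySem.List.pyGetD u 0 0 ≤ beg)) : Nat) : Int) - 1) []) 1 0 - beg + 1)
      else
        (PySem.List.slice (pvLens tiles) none (some ((0 : Int) + (k : Int) + 1))).sum
        - (PySem.List.slice (pvLens tiles) none (some (((pvSrt tiles).countP (fun u => decide (PySem.List.pyGetD u 0 0 ≤ beg)) : Nat) : Int))).sum) := by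
  have hn : 0 < (pvSrt tiles).length := by omega
  have hl : pvBsearch (pvSrt tiles) beg (-1) (((pvSrt tiles).length : Nat) : Int)
      = ((pvCnt tiles beg : Nat) : Int) - 1 :=
    pv_bsearch_eq tiles beg (-1) _ le_rfl (by omega) (by exact_mod_cast pv_cnt_le_len tiles beg) le_rfl
  rw [hl]
  have hcntP : (pvSrt tiles).countP (fun u => decide (PySem.List.pyGetD u 0 0 ≤ beg)) = pvCnt tiles beg := rfl
  rw [hcntP]
  have h1 : ((pvCnt tiles beg : Nat) : Int) - 1 + 1 = ((pvCnt tiles beg : Nat) : Int) := by ring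
  rw [h1]
  rw [PySem.List.slice_to _ (by omega), PySem.List.slice_to _ (by omega)]
  simp only [pvS]
  by_cases hc0 : pvCnt tiles beg = 0
  · have hget0 : PySem.List.pyGetD (pvSrt tiles) (max 0 (((pvCnt tiles beg : Nat) : Int) - 1)) []
        = (pvSrt tiles)[0]'hn := by
      rw [show (max 0 (((pvCnt tiles beg : Nat) : Int) - 1)) = 0 by omega]
      rw [PySem.List.pyGetD_eq_getElem _ _ le_rfl (by exact_mod_cast hn)]
      rfl
    have hnot : ¬ (PySem.List.pyGetD ((pvSrt tiles)[0]'hn) 0 0 ≤ beg) := by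
      intro hle
      have := (pv_cnt_iff tiles beg 0 hn).mp (by simpa using hle)
      omega
    rw [hget0, if_neg (fun h => hnot h.1), if_neg (by intro h; omega)]
    ring
  · have hpos : 0 < pvCnt tiles beg := Nat.pos_of_ne_zero hc0
    have hcle : pvCnt tiles beg ≤ (pvSrt tiles).length := pv_cnt_le_len tiles beg
    have hmax : max 0 (((pvCnt tiles beg : Nat) : Int) - 1) = ((pvCnt tiles beg : Nat) : Int) - 1 := by omega
    rw [hmax]
    have hget : PySem.List.pyGetD (pvSrt tiles) (((pvCnt tiles beg : Nat) : Int) - 1) []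
        = (pvSrt tiles)[pvCnt tiles beg - 1]'(by omega) := by
      rw [PySem.List.pyGetD_eq_getElem _ _ (by omega) (by omega)]
      congr 1
      omega
    rw [hget]
    have hfst : PySem.List.pyGetD ((pvSrt tiles)[pvCnt tiles beg - 1]'(by omega)) 0 0 ≤ beg := by
      have := (pv_cnt_iff tiles beg (pvCnt tiles beg - 1) (by omega)).mpr (by omega)
      simpa using this
    have htriv : (0 : Int) < ((pvCnt tiles beg : Nat) : Int) := by exact_mod_cast hpos
    split_ifs with ha hb hb
    · ring
    · exact absurd ⟨htriv, ha.2⟩ hb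
    · exact absurd ⟨hfst, hb.2⟩ ha
    · ring

-- per index, A's cover value equals B's
theorem pv_cover_eq (tiles : List (List Int)) (carpetLen : Int)
    (k : Nat) (hk : k < (pvSrt tiles).length) :
    pvCoverA tiles carpetLen ((0 : Int) + (k : Int)) ((pvSrt tiles)[k]'hk)
      = (let srt := pvSrt tiles
         let t := (pvSrt tiles)[k]'hk
         let begin_ := pvBeg carpetLen t
         let cnt : Int := (srt.countP (fun u => decide (PySem.List.pyGetD u 0 0 ≤ begin_)) : Int)
         let cover := (PySem.List.slice (pvLens tiles) none (some ((0 : Int) + (k : Int) + 1))).sum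
                      - (PySem.List.slice (pvLens tiles) none (some cnt)).sum
         if 0 < cnt ∧ begin_ ≤ PySem.List.pyGetD (PySem.List.pyGetD srt (cnt - 1) []) 1 0 then
           cover + (PySem.List.pyGetD (PySem.List.pyGetD srt (cnt - 1) []) 1 0 - begin_ + 1)
         else cover) := by
  simp only [pvCoverA, pvBeg]
  exact pv_cover_core tiles k hk _

-- ===== VERDICT (by name: the statement is the Claim_ definition above) =====
theorem solution_1567_2_spec : Claim_equal_solution_1567_2 := by
  intro tiles carpetLen hdom hpre
  unfold Spec_solution_1567_2
  obtain ⟨hrows, hcount⟩ := hpre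
  have hPre : ∀ (k : Nat) (hk : k < (pvSrt tiles).length),
      (pvCnt tiles (pvBeg carpetLen ((pvSrt tiles)[k]'hk)) : Int) ≤ (k : Int) + 1 := by
    intro k hk
    have hmem : ((0 : Int) + (k : Int), (pvSrt tiles)[k]'hk) ∈ PySem.List.enumerate (pvSrt tiles) 0 :=
      (PySem.List.mem_enumerate_iff _ _ _).mpr ⟨k, hk, rfl⟩
    have h2 := hcount _ hmem
    simp only [pvCnt, pvBeg, pvSrt]
    have h3 : ((0 : Int) + (k : Int) + 1) = (k : Int) + 1 := by ring
    rw [h3] at h2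
    exact h2
  have hA := pv_A_loop tiles carpetLen hPre ((pvSrt tiles).length) 0 0 (by omega) (by omega)
  simp only [List.drop_zero] at hA
  have h0 : pvPs tiles 0 = [0] := rfl
  rw [h0] at hA
  simp only [solution_1567_2, solution_1567_2_alt]
  rw [show PySem.List.sorted tiles (fun t => PySem.List.pyGetD t 0 0) false = pvSrt tiles from rfl]
  rw [hA]
  apply PySem.List.foldl_congr_mem
  intro acc p hp
  obtain ⟨k, hk, rfl⟩ := (PySem.List.mem_enumerate_iff _ _ _).mp hp
  exact congrArg (max acc) (pv_cover_eq tiles carpetLen k hk)
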